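-- pv_equiv track=rewrite | github.com/chingf/icl-maze | src/envs/make_dist_mat.py | calculate_tree_geodesic_distance
-- ===== SOURCE A (Python) =====
-- def calculate_tree_geodesic_distance(node1, node2):
--     # Calculate the path from the root to each node
--     path1 = []
--     path2 = []
--
--     # Find the path to the root for node1
--     while node1 > 0:
--         path1.append(node1)
--         node1 = (node1 - 1) // 2
--
--     # Find the path to the root for node2
--     while node2 > 0:
--         path2.append(node2)
--         node2 = (node2 - 1) // 2
--
--     # Add the root node
--     path1.append(0)
--     path2.append(0)
--
--     # Reverse the paths to start from the root
--     path1.reverse()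
--     path2.reverse()
--
--     # Find the lowest common ancestor
--     i = 0
--     while i < len(path1) and i < len(path2) and path1[i] == path2[i]:
--         i += 1
--
--     # Calculate the geodesic distance
--     distance = (len(path1) - i) + (len(path2) - i)
--     return distance
-- ===== SOURCE B (Python) =====
-- def calculate_tree_geodesic_distance(node1, node2):
--     # Climb the deeper/larger node toward the root until the two meet; no path lists.
--     a = node1 if node1 > 0 else 0
--     b = node2 if node2 > 0 else 0
--     dist = 0
--     while a != b:
--         if a > b:
--             a = (a - 1) // 2
--         else:
--             b = (b - 1) // 2
--         dist += 1
--     return dist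
-- ===== Notes on version B (the rewrite author's own statement) =====
-- stated objective: simpler
-- what changed: Instead of materialising both root paths, reversing them and scanning for the common prefix, B keeps only the two current indices and climbs the larger one toward the root, counting steps until they meet.
import Mathlib
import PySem

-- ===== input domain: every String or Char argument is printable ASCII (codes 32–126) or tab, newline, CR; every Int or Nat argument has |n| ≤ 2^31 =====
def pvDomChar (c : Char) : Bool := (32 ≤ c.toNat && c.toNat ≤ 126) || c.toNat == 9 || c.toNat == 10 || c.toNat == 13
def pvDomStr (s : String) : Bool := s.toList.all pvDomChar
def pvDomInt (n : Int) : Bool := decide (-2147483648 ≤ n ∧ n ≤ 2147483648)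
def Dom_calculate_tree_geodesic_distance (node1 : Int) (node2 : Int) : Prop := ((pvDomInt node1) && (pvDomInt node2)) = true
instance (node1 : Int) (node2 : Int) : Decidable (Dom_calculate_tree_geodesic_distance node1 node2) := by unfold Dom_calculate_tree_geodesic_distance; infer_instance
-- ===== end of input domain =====

-- B replaces A's two materialised root paths + common-prefix scan by climbing the
-- larger index toward the root in place (alternative decomposition, O(1) extra space).

-- termination helpers for the ports (cited by decreasing_by)
theorem pvParent_lt_toNat (n : Int) (h : 0 < n) :
    (PySem.Int.floordiv (n - 1) 2).toNat < n.toNat := by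
  rw [PySem.Int.floordiv_eq_ediv_of_pos (by omega)]; omega

theorem pvParent_nonneg (n : Int) (h : 0 < n) : 0 ≤ PySem.Int.floordiv (n - 1) 2 := by
  rw [PySem.Int.floordiv_eq_ediv_of_pos (by omega)]; omega

-- ===== PORT A =====
-- the 'while node > 0' path-collecting loop of A
def pathUpA (n : Int) : List Int :=
  if h : n > 0 then n :: pathUpA (PySem.Int.floordiv (n - 1) 2) else []
termination_by n.toNat
decreasing_by exact pvParent_lt_toNat n h

-- A's common-prefix loop: while i < len(p1) and i < len(p2) and p1[i] == p2[i]: i += 1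
def lcaLoop (p1 p2 : List Int) (i : Int) : Int :=
  if h : i < (p1.length : Int) ∧ i < (p2.length : Int) ∧
         PySem.List.pyGet? p1 i = PySem.List.pyGet? p2 i then
    lcaLoop p1 p2 (i + 1)
  else i
termination_by ((p1.length : Int) - i).toNat
decreasing_by omega

def calculate_tree_geodesic_distance (node1 : Int) (node2 : Int) : Int :=
  let path1 := (pathUpA node1 ++ [0]).reverse
  let path2 := (pathUpA node2 ++ [0]).reverse
  let i := lcaLoop path1 path2 0
  ((path1.length : Int) - i) + ((path2.length : Int) - i)

-- ===== PORT B =====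
-- B's 'while a != b' loop; the nonnegativity proofs only justify termination
def climbB (a b : Int) (ha : 0 ≤ a) (hb : 0 ≤ b) (dist : Int) : Int :=
  if hne : a ≠ b then
    if hgt : a > b then
      climbB (PySem.Int.floordiv (a - 1) 2) b (pvParent_nonneg a (by omega)) hb (dist + 1)
    else
      climbB a (PySem.Int.floordiv (b - 1) 2) ha (pvParent_nonneg b (by omega)) (dist + 1)
  else dist
termination_by a.toNat + b.toNat
decreasing_by
  · have := pvParent_lt_toNat a (by omega); omega
  · have := pvParent_lt_toNat b (by omega); omega

def calculate_tree_geodesic_distance_alt (node1 : Int) (node2 : Int) : Int :=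
  climbB (if node1 > 0 then node1 else 0) (if node2 > 0 then node2 else 0)
    (by split <;> omega) (by split <;> omega) 0

-- ===== PRECONDITION & SPEC =====
def Spec_calculate_tree_geodesic_distance (node1 : Int) (node2 : Int) (out : Int) : Prop := out = calculate_tree_geodesic_distance_alt node1 node2
instance (node1 : Int) (node2 : Int) (out : Int) : Decidable (Spec_calculate_tree_geodesic_distance node1 node2 out) := by unfold Spec_calculate_tree_geodesic_distance; infer_instance

-- ===== CLAIM (what is proved, stated in full; the proofs are below) =====
def Claim_equal_calculate_tree_geodesic_distance : Prop := ∀ (node1 : Int) (node2 : Int), Dom_calculate_tree_geodesic_distance node1 node2 → Spec_calculate_tree_geodesic_distance node1 node2 (calculate_tree_geodesic_distance node1 node2)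

-- ===== LEMMAS AND PROOFS =====

theorem pathUpA_nonpos (n : Int) (h : n ≤ 0) : pathUpA n = [] := by
  unfold pathUpA; simp [show ¬ n > 0 by omega]

theorem mem_pathUpA (n y : Int) (h : y ∈ pathUpA n) : y ≤ n := by
  unfold pathUpA at h
  by_cases hn : n > 0
  · simp only [hn, dite_true, List.mem_cons] at h
    rcases h with h | h
    · omega
    · have h1 := mem_pathUpA _ _ h
      have h2 : PySem.Int.floordiv (n - 1) 2 < n := by
        rw [PySem.Int.floordiv_eq_ediv_of_pos (by omega)]; omega
      omega
  · simp [hn] at h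
termination_by n.toNat
decreasing_by exact pvParent_lt_toNat n hn

theorem lcaLoop_self (p : List Int) (i : Int) (h0 : 0 ≤ i) (hle : i ≤ (p.length : Int)) :
    lcaLoop p p i = (p.length : Int) := by
  unfold lcaLoop
  by_cases hi : i < (p.length : Int)
  · simp only [hi, and_self, dite_true]
    exact lcaLoop_self p (i + 1) (by omega) (by omega)
  · simp only [hi, false_and, dite_false]; omega
termination_by ((p.length : Int) - i).toNat
decreasing_by omega

theorem pyGet?_append_singleton (p : List Int) (x : Int) (i : Int) (h0 : 0 ≤ i)
    (hi : i < (p.length : Int)) :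
    PySem.List.pyGet? (p ++ [x]) i = PySem.List.pyGet? p i := by
  rw [PySem.List.pyGet?_of_nonneg _ h0, PySem.List.pyGet?_of_nonneg _ h0]
  rw [List.getElem?_append_left (by omega)]

theorem lcaLoop_append_left (p q : List Int) (x : Int) (hx : x ∉ q) (i : Int) (h0 : 0 ≤ i) :
    lcaLoop (p ++ [x]) q i = lcaLoop p q i := by
  by_cases hi : i < (p.length : Int)
  · have hlen : i < ((p ++ [x]).length : Int) := by simp; omega
    conv_lhs => rw [lcaLoop]
    conv_rhs => rw [lcaLoop]
    rw [pyGet?_append_singleton p x i h0 hi]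
    simp only [hlen, hi, true_and]
    by_cases hc : i < (q.length : Int) ∧ PySem.List.pyGet? p i = PySem.List.pyGet? q i
    · rw [dif_pos hc, dif_pos hc]
      exact lcaLoop_append_left p q x hx (i + 1) (by omega)
    · rw [dif_neg hc, dif_neg hc]
  · conv_lhs => rw [lcaLoop]
    conv_rhs => rw [lcaLoop]
    have hR : ¬ (i < (p.length : Int) ∧ i < (q.length : Int) ∧
        PySem.List.pyGet? p i = PySem.List.pyGet? q i) := by tauto
    by_cases heq : i = (p.length : Int)
    · have hget : PySem.List.pyGet? (p ++ [x]) i = some x := by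
        rw [heq]; exact PySem.List.pyGet?_append_length p [] x
      have hL : ¬ (i < ((p ++ [x]).length : Int) ∧ i < (q.length : Int) ∧
          PySem.List.pyGet? (p ++ [x]) i = PySem.List.pyGet? q i) := by
        rintro ⟨-, -, hE⟩
        rw [hget] at hE
        exact hx (PySem.List.mem_of_pyGet?_eq_some q hE.symm)
      rw [dif_neg hL, dif_neg hR]
    · have hL : ¬ (i < ((p ++ [x]).length : Int) ∧ i < (q.length : Int) ∧
          PySem.List.pyGet? (p ++ [x]) i = PySem.List.pyGet? q i) := by
        rintro ⟨hl, -, -⟩; simp at hl; omega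
      rw [dif_neg hL, dif_neg hR]
termination_by ((p.length : Int) - i).toNat
decreasing_by omega

theorem lcaLoop_append_right (p q : List Int) (x : Int) (hx : x ∉ p) (i : Int) (h0 : 0 ≤ i) :
    lcaLoop p (q ++ [x]) i = lcaLoop p q i := by
  by_cases hi : i < (q.length : Int)
  · have hlen : i < ((q ++ [x]).length : Int) := by simp; omega
    conv_lhs => rw [lcaLoop]
    conv_rhs => rw [lcaLoop]
    rw [pyGet?_append_singleton q x i h0 hi]
    simp only [hlen, hi, true_and]
    by_cases hc : i < (p.length : Int) ∧ PySem.List.pyGet? p i = PySem.List.pyGet? q i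
    · rw [dif_pos hc, dif_pos hc]
      exact lcaLoop_append_right p q x hx (i + 1) (by omega)
    · rw [dif_neg hc, dif_neg hc]
  · conv_lhs => rw [lcaLoop]
    conv_rhs => rw [lcaLoop]
    have hR : ¬ (i < (p.length : Int) ∧ i < (q.length : Int) ∧
        PySem.List.pyGet? p i = PySem.List.pyGet? q i) := by tauto
    by_cases heq : i = (q.length : Int)
    · have hget : PySem.List.pyGet? (q ++ [x]) i = some x := by
        rw [heq]; exact PySem.List.pyGet?_append_length q [] x
      have hL : ¬ (i < (p.length : Int) ∧ i < ((q ++ [x]).length : Int) ∧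
          PySem.List.pyGet? p i = PySem.List.pyGet? (q ++ [x]) i) := by
        rintro ⟨-, -, hE⟩
        rw [hget] at hE
        exact hx (PySem.List.mem_of_pyGet?_eq_some p hE)
      rw [dif_neg hL, dif_neg hR]
    · have hL : ¬ (i < (p.length : Int) ∧ i < ((q ++ [x]).length : Int) ∧
          PySem.List.pyGet? p i = PySem.List.pyGet? (q ++ [x]) i) := by
        rintro ⟨-, hl, -⟩; simp at hl; omega
      rw [dif_neg hL, dif_neg hR]
termination_by ((q.length : Int) - i).toNat
decreasing_by omega

theorem climbB_acc (a b : Int) (ha : 0 ≤ a) (hb : 0 ≤ b) (d : Int) :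
    climbB a b ha hb d = d + climbB a b ha hb 0 := by
  conv_lhs => rw [climbB]
  conv_rhs => rw [climbB]
  by_cases hne : a ≠ b
  · rw [dif_pos hne, dif_pos hne]
    by_cases hgt : a > b
    · rw [dif_pos hgt, dif_pos hgt]
      rw [climbB_acc _ _ _ _ (d + 1), climbB_acc _ _ _ _ (0 + 1 : Int)]
      omega
    · rw [dif_neg hgt, dif_neg hgt]
      rw [climbB_acc _ _ _ _ (d + 1), climbB_acc _ _ _ _ (0 + 1 : Int)]
      omega
  · rw [dif_neg hne, dif_neg hne]; omega
termination_by a.toNat + b.toNat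
decreasing_by
  · have := pvParent_lt_toNat a (by omega); omega
  · have := pvParent_lt_toNat a (by omega); omega
  · have := pvParent_lt_toNat b (by omega); omega
  · have := pvParent_lt_toNat b (by omega); omega

-- A's full expression on clamped (nonnegative) inputs equals B's loop
theorem pvMain (a b : Int) (ha : 0 ≤ a) (hb : 0 ≤ b) :
    ((((pathUpA a ++ [0]).reverse.length : Nat) : Int) -
        lcaLoop (pathUpA a ++ [0]).reverse (pathUpA b ++ [0]).reverse 0) +
      ((((pathUpA b ++ [0]).reverse.length : Nat) : Int) -
        lcaLoop (pathUpA a ++ [0]).reverse (pathUpA b ++ [0]).reverse 0) =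
    climbB a b ha hb 0 := by
  by_cases hne : a = b
  · subst hne
    rw [lcaLoop_self _ 0 (by omega) (by omega)]
    rw [climbB]
    simp
  · by_cases hgt : a > b
    · have hpos : 0 < a := by omega
      have hstep : pathUpA a = a :: pathUpA (PySem.Int.floordiv (a - 1) 2) := by
        rw [pathUpA]; simp [hpos]
      have hnotmem : a ∉ (pathUpA b ++ [0]).reverse := by
        intro hmem
        rw [List.mem_reverse] at hmem
        rcases List.mem_append.mp hmem with h | h
        · have := mem_pathUpA b a h; omega
        · simp at h; omega
      have hrev : (pathUpA a ++ [0]).reverse =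
          (pathUpA (PySem.Int.floordiv (a - 1) 2) ++ [0]).reverse ++ [a] := by
        rw [hstep]; simp
      rw [hrev]
      rw [lcaLoop_append_left _ _ _ hnotmem 0 (by omega)]
      have hIH := pvMain (PySem.Int.floordiv (a - 1) 2) b (pvParent_nonneg a hpos) hb
      have hpe : climbB a b ha hb 0 =
          1 + climbB (PySem.Int.floordiv (a - 1) 2) b (pvParent_nonneg a hpos) hb 0 := by
        conv_lhs => rw [climbB]
        rw [dif_pos hne, dif_pos hgt, climbB_acc]
        rw [zero_add]
      rw [hpe]
      simp only [List.length_append, List.length_reverse, List.length_cons,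
        List.length_nil] at hIH ⊢
      push_cast at hIH ⊢
      omega
    · have hpos : 0 < b := by omega
      have hstep : pathUpA b = b :: pathUpA (PySem.Int.floordiv (b - 1) 2) := by
        rw [pathUpA]; simp [hpos]
      have hnotmem : b ∉ (pathUpA a ++ [0]).reverse := by
        intro hmem
        rw [List.mem_reverse] at hmem
        rcases List.mem_append.mp hmem with h | h
        · have := mem_pathUpA a b h; omega
        · simp at h; omega
      have hrev : (pathUpA b ++ [0]).reverse =
          (pathUpA (PySem.Int.floordiv (b - 1) 2) ++ [0]).reverse ++ [b] := by
        rw [hstep]; simp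
      rw [hrev]
      rw [lcaLoop_append_right _ _ _ hnotmem 0 (by omega)]
      have hIH := pvMain a (PySem.Int.floordiv (b - 1) 2) ha (pvParent_nonneg b hpos)
      have hpe : climbB a b ha hb 0 =
          1 + climbB a (PySem.Int.floordiv (b - 1) 2) ha (pvParent_nonneg b hpos) 0 := by
        conv_lhs => rw [climbB]
        rw [dif_pos hne, dif_neg hgt, climbB_acc]
        rw [zero_add]
      rw [hpe]
      simp only [List.length_append, List.length_reverse, List.length_cons,
        List.length_nil] at hIH ⊢
      push_cast at hIH ⊢
      omega
termination_by a.toNat + b.toNat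
decreasing_by
  · have := pvParent_lt_toNat a (by omega); omega
  · have := pvParent_lt_toNat b (by omega); omega

-- A is unchanged by clamping a nonpositive node to 0
theorem pathUpA_clamp (n : Int) : pathUpA n = pathUpA (if n > 0 then n else 0) := by
  by_cases h : n > 0
  · simp [h]
  · simp only [h, if_false]
    rw [pathUpA_nonpos n (by omega), pathUpA_nonpos 0 (by omega)]

-- ===== VERDICT (by name: the statement is the Claim_ definition above) =====
theorem calculate_tree_geodesic_distance_spec : Claim_equal_calculate_tree_geodesic_distance := by
  intro node1 node2 _
  unfold Spec_calculate_tree_geodesic_distance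
  unfold calculate_tree_geodesic_distance calculate_tree_geodesic_distance_alt
  rw [pathUpA_clamp node1, pathUpA_clamp node2]
  exact pvMain (if node1 > 0 then node1 else 0) (if node2 > 0 then node2 else 0)
    (by split <;> omega) (by split <;> omega)
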